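-- pv_equiv track=rewrite | github.com/corazza/text2task | src/datasets_common.py | extract_time_vars
-- ===== SOURCE A (Python) =====
-- def extract_time_vars(a: str) -> list[str]:
--     r = []
--     buf = ''
--     reading: bool = False
--     for c in a:
--         if c == '#':
--             reading = True
--         elif c.isalpha():
--             if reading:
--                 buf += c
--         else:
--             reading = False
--             if len(buf) > 0:
--                 r.append(buf)
--             buf = ''
--     if len(buf) > 0:
--         r.append(buf)
--     return r
-- ===== SOURCE B (Python) =====
-- def extract_time_vars(a: str) -> list[str]:
--     # B: two-pointer run scanner: split the input into maximal runs of
--     # "alpha or '#'" characters, then extract each run's token in one shot.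
--     r = []
--     i, n = 0, len(a)
--     key = lambda c: c.isalpha() or c == '#'
--     while i < n:
--         if not key(a[i]):
--             i += 1
--             continue
--         j = i
--         while j < n and key(a[j]):
--             j += 1
--         run = a[i:j]
--         if '#' in run:
--             tok = ''.join(ch for ch in run[run.index('#'):] if ch.isalpha())
--             if tok:
--                 r.append(tok)
--         i = j
--     return r
-- ===== Notes on version B (the rewrite author's own statement) =====
-- stated objective: alternative
-- what changed: Replaces A's per-character reading/buffer state machine with a two-pointer scanner that isolates each maximal run of alpha-or-'#' characters and computes its token (alphabetic chars from the first '#') in one slice-and-filter step.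
import Mathlib
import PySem

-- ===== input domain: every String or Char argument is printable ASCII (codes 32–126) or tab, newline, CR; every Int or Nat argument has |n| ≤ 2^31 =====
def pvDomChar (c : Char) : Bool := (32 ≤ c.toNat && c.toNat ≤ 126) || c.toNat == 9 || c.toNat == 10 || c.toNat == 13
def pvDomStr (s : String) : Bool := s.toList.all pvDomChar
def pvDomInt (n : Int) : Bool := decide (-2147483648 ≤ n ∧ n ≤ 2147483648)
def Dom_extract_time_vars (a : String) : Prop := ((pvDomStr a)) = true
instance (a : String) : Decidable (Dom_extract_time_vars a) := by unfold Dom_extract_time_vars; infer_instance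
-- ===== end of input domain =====

-- B replaces A's per-character reading/buffer state machine with a run scanner
-- (maximal runs of alpha-or-'#' characters, one slice-and-filter per run); same cost.

-- ===== PORT A =====
-- state = (r, buf, reading); one loop step of A
def pvStepA (st : List (List Char) × List Char × Bool) (c : Char) :
    List (List Char) × List Char × Bool :=
  if c = '#' then (st.1, st.2.1, true)
  else if PySem.Chars.isalpha c then
    (if st.2.2 then (st.1, st.2.1 ++ [c], st.2.2) else st)
  else ((if st.2.1 ≠ [] then st.1 ++ [st.2.1] else st.1), [], false)

-- the trailing 'if len(buf) > 0: r.append(buf)'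
def pvFinishA (st : List (List Char) × List Char × Bool) : List (List Char) :=
  if st.2.1 ≠ [] then st.1 ++ [st.2.1] else st.1

def extract_time_vars (a : String) : List String :=
  (pvFinishA (a.toList.foldl pvStepA ([], [], false))).map String.ofList

-- ===== PORT B =====
def pvKey (c : Char) : Bool := PySem.Chars.isalpha c || c == '#'

-- the while loop of Source B: skip a non-key char, or take the whole maximal key-run
-- (c :: takeWhile = a[i:j]; run[run.index('#'):] = run with everything before the first '#' dropped)
def pvRunsB : List Char → List (List Char)
  | [] => []
  | c :: cs =>
    if pvKey c then
      let run := c :: cs.takeWhile pvKey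
      let rest := cs.dropWhile pvKey
      (if run.contains '#' then
         (let tok := (run.dropWhile (fun x => x != '#')).filter PySem.Chars.isalpha
          if tok ≠ [] then [tok] else [])
       else []) ++ pvRunsB rest
    else pvRunsB cs
termination_by l => l.length
decreasing_by
  · have := List.length_dropWhile_le (p := pvKey) (l := cs); simp; omega
  · simp

def extract_time_vars_alt (a : String) : List String :=
  (pvRunsB a.toList).map String.ofList

-- ===== PRECONDITION & SPEC =====
def Spec_extract_time_vars (a : String) (out : List String) : Prop := out = extract_time_vars_alt a
instance (a : String) (out : List String) : Decidable (Spec_extract_time_vars a out) := by unfold Spec_extract_time_vars; infer_instance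

-- ===== CLAIM (what is proved, stated in full; the proofs are below) =====
def Claim_equal_extract_time_vars : Prop := ∀ (a : String), Dom_extract_time_vars a → Spec_extract_time_vars a (extract_time_vars a)

-- ===== LEMMAS AND PROOFS =====

lemma pvKey_false {c : Char} (h : pvKey c = false) :
    c ≠ '#' ∧ PySem.Chars.isalpha c = false := by
  unfold pvKey at h
  simp only [Bool.or_eq_false_iff, beq_eq_false_iff_ne] at h
  exact ⟨h.2, h.1⟩

lemma pvStepA_nonkey {c : Char} (h : pvKey c = false)
    (r : List (List Char)) (buf : List Char) (b : Bool) :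
    pvStepA (r, buf, b) c = ((if buf ≠ [] then r ++ [buf] else r), [], false) := by
  obtain ⟨h1, h2⟩ := pvKey_false h
  simp [pvStepA, h1, h2]

lemma pvHash_not_alpha : PySem.Chars.isalpha '#' = false := by decide

-- A's loop over key characters, reading already true
lemma pvFoldA_reading (run : List Char) (hk : ∀ x ∈ run, pvKey x = true) :
    ∀ (r : List (List Char)) (buf : List Char),
      List.foldl pvStepA (r, buf, true) run =
        (r, buf ++ run.filter PySem.Chars.isalpha, true) := by
  induction run with
  | nil => intro r buf; simp
  | cons x xs ih =>
    intro r buf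
    have hx := hk x (by simp)
    have hxs : ∀ y ∈ xs, pvKey y = true := fun y hy => hk y (by simp [hy])
    by_cases hxh : x = '#'
    · subst hxh
      simp [List.foldl_cons, pvStepA, pvHash_not_alpha, ih hxs]
    · have ha : PySem.Chars.isalpha x = true := by
        unfold pvKey at hx
        simpa [hxh] using hx
      simp [List.foldl_cons, pvStepA, hxh, ha, ih hxs]

-- A's loop over a whole key-run from a flushed state
lemma pvFoldA_run (run : List Char) (hk : ∀ x ∈ run, pvKey x = true)
    (r : List (List Char)) :
    List.foldl pvStepA (r, [], false) run =
      (r, (run.dropWhile (fun x => x != '#')).filter PySem.Chars.isalpha,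
       run.contains '#') := by
  induction run with
  | nil => simp
  | cons x xs ih =>
    have hxs : ∀ y ∈ xs, pvKey y = true := fun y hy => hk y (by simp [hy])
    by_cases hxh : x = '#'
    · subst hxh
      simp [List.foldl_cons, pvStepA, pvFoldA_reading xs hxs,
        List.dropWhile, pvHash_not_alpha]
    · have ha : PySem.Chars.isalpha x = true := by
        have hx := hk x (by simp)
        unfold pvKey at hx
        simpa [hxh] using hx
      have hne : (x != '#') = true := by simpa using hxh
      simp [List.foldl_cons, pvStepA, hxh, ha, ih hxs, List.dropWhile, hne,
        List.contains_cons, Ne.symm hxh]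

-- no '#' in the run ⇒ the token is empty
lemma pvTok_nil {run : List Char} (h : run.contains '#' = false) :
    (run.dropWhile (fun x => x != '#')).filter PySem.Chars.isalpha = [] := by
  have : run.dropWhile (fun x => x != '#') = [] := by
    rw [List.dropWhile_eq_nil_iff]
    intro x hx
    simp only [List.contains_eq_mem, decide_eq_false_iff_not] at h
    simp only [bne_iff_ne, ne_eq]
    exact fun hxe => h (hxe ▸ hx)
  simp [this]

-- head of dropWhile fails the predicate
lemma pvDropWhile_head {p : Char → Bool} {l : List Char} {d : Char} {ds : List Char}
    (h : l.dropWhile p = d :: ds) : p d = false := by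
  induction l with
  | nil => simp at h
  | cons x xs ih =>
    by_cases hx : p x
    · exact ih (by simpa [List.dropWhile, hx] using h)
    · rw [List.dropWhile_cons_of_neg (by simpa using hx)] at h
      cases h
      simpa using hx

-- main invariant: A's fold (with accumulator r) computes r ++ B's runs
lemma pvMain : ∀ (n : Nat) (l : List Char), l.length ≤ n → ∀ (r : List (List Char)),
    pvFinishA (List.foldl pvStepA (r, [], false) l) = r ++ pvRunsB l := by
  intro n
  induction n with
  | zero =>
    intro l hl r
    have : l = [] := List.eq_nil_of_length_eq_zero (Nat.le_zero.mp hl)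
    subst this
    simp [pvFinishA, pvRunsB]
  | succ n ih =>
    intro l hl r
    match l with
    | [] => simp [pvFinishA, pvRunsB]
    | c :: cs =>
      have hcs : cs.length ≤ n := by simpa using hl
      by_cases hc : pvKey c
      · -- key run case
        have hkrun : ∀ x ∈ c :: cs.takeWhile pvKey, pvKey x = true := by
          intro x hx
          rcases List.mem_cons.mp hx with h | h
          · exact h ▸ hc
          · exact List.mem_takeWhile_imp h
        have hsplit : c :: cs = (c :: cs.takeWhile pvKey) ++ cs.dropWhile pvKey := by
          simp [List.takeWhile_append_dropWhile]
        have hfold : List.foldl pvStepA (r, [], false) (c :: cs) =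
            List.foldl pvStepA
              (r, ((c :: cs.takeWhile pvKey).dropWhile (fun x => x != '#')).filter
                    PySem.Chars.isalpha,
               (c :: cs.takeWhile pvKey).contains '#') (cs.dropWhile pvKey) := by
          conv_lhs => rw [hsplit]
          rw [List.foldl_append, pvFoldA_run _ hkrun]
        have hB : pvRunsB (c :: cs) =
            (if (c :: cs.takeWhile pvKey).contains '#' then
               (if ((c :: cs.takeWhile pvKey).dropWhile (fun x => x != '#')).filter
                     PySem.Chars.isalpha ≠ [] then
                  [((c :: cs.takeWhile pvKey).dropWhile (fun x => x != '#')).filter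
                     PySem.Chars.isalpha]
                else [])
             else []) ++ pvRunsB (cs.dropWhile pvKey) := by
          conv_lhs => rw [pvRunsB]
          simp only [hc, if_true]
        have htokpart : (if (c :: cs.takeWhile pvKey).contains '#' then
               (if ((c :: cs.takeWhile pvKey).dropWhile (fun x => x != '#')).filter
                     PySem.Chars.isalpha ≠ [] then
                  [((c :: cs.takeWhile pvKey).dropWhile (fun x => x != '#')).filter
                     PySem.Chars.isalpha]
                else [])
             else [])
            = (if ((c :: cs.takeWhile pvKey).dropWhile (fun x => x != '#')).filter
                     PySem.Chars.isalpha ≠ [] then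
                 [((c :: cs.takeWhile pvKey).dropWhile (fun x => x != '#')).filter
                    PySem.Chars.isalpha]
               else []) := by
          by_cases hco : (c :: cs.takeWhile pvKey).contains '#'
          · rw [if_pos hco]
          · rw [if_neg hco, pvTok_nil (Bool.eq_false_iff.mpr hco), if_neg (by simp)]
        rcases hdrop : cs.dropWhile pvKey with _ | ⟨d, ds⟩
        · rw [hdrop] at hfold
          rw [hfold]
          simp only [List.foldl_nil, pvFinishA]
          rw [hB, hdrop, htokpart]
          by_cases ht : ((c :: cs.takeWhile pvKey).dropWhile (fun x => x != '#')).filter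
              PySem.Chars.isalpha = [] <;> simp [ht, pvRunsB]
        · have hd : pvKey d = false := pvDropWhile_head hdrop
          have hds : ds.length ≤ n := by
            have h1 := List.length_dropWhile_le pvKey cs
            rw [hdrop] at h1; simp at h1; omega
          rw [hdrop] at hfold
          rw [hfold, List.foldl_cons, pvStepA_nonkey hd, ih ds hds, hB, hdrop]
          have hBd : pvRunsB (d :: ds) = pvRunsB ds := by
            rw [pvRunsB]; simp [hd]
          rw [hBd, htokpart]
          by_cases ht : ((c :: cs.takeWhile pvKey).dropWhile (fun x => x != '#')).filter
              PySem.Chars.isalpha = [] <;> simp [ht]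
      · -- non-key char: flush of empty buffer, skip
        have hstep := pvStepA_nonkey (by simpa using hc) r [] false
        simp only [ne_eq, not_true_eq_false, if_false] at hstep
        rw [List.foldl_cons, hstep, ih cs hcs r]
        have : pvRunsB (c :: cs) = pvRunsB cs := by
          rw [pvRunsB]; simp [hc]
        rw [this]

-- ===== VERDICT (by name: the statement is the Claim_ definition above) =====
theorem extract_time_vars_spec : Claim_equal_extract_time_vars := by
  intro a _
  unfold Spec_extract_time_vars extract_time_vars extract_time_vars_alt
  rw [pvMain a.toList.length a.toList le_rfl []]
  simp
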